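-- pv_equiv track=rewrite | github.com/jonabako/ldpc-peg-test | generate_ldpc_matrix.py | find_check_node_with_lowest_degree
-- ===== SOURCE A (Python) =====
-- def find_check_node_with_lowest_degree(matrix, nodes=None):
--     # If nodes are provided, consider only those nodes
--     if nodes:
--         min_degree = float('inf')
--         min_degree_node = None
--         for node in nodes:
--             degree = sum(row[node] for row in matrix)
--             if degree < min_degree:
--                 min_degree = degree
--                 min_degree_node = node
--         return min_degree_node
--     else:
--         # Find the check node with the lowest degree
--         min_degree = min(sum(row) for row in matrix)
--         for node, row in enumerate(matrix):
--             if sum(row) == min_degree: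
--                 return node
-- ===== SOURCE B (Python) =====
-- def find_check_node_with_lowest_degree(matrix, nodes=None):
--     # B: stable sort of the candidates by degree, then take the head;
--     # stability makes the head the FIRST minimizer, matching A's strict-< rule.
--     if nodes:
--         return sorted(nodes, key=lambda n: sum(row[n] for row in matrix))[0]
--     return sorted(enumerate(matrix), key=lambda t: sum(t[1]))[0][0]
-- ===== Notes on version B (the rewrite author's own statement) =====
-- stated objective: alternative
-- what changed: Both of A's scan loops (the manual inf/accumulator loop and the two-pass compute-min-then-rescan) are replaced by sort-then-head: the candidates are stably sorted by degree and the first element taken, stability giving A's first-minimizer tie-breaking.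
import Mathlib
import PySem

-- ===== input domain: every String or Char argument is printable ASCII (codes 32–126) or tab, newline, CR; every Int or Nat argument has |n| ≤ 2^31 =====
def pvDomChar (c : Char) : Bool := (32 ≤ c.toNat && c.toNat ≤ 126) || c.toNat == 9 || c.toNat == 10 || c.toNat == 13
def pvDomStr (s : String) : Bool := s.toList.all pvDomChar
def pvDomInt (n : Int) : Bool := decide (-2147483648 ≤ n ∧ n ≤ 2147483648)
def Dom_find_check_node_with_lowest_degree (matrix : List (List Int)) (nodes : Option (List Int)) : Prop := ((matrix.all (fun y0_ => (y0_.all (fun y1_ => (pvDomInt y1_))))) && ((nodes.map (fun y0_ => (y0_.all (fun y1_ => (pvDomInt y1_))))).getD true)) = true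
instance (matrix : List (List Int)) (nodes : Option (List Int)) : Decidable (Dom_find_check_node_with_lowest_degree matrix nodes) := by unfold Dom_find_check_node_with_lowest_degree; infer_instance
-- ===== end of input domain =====

-- B replaces both of A's scan loops by sort-then-head: the candidates are stably sorted by
-- degree and the first element taken; return value only, neither version mutates its arguments.

-- ===== PORT A =====
-- degree of node n: sum(row[n] for row in matrix); pyGet? none (IndexError) is excluded by Pre_,
-- so the getD 0 default is never taken on admitted inputs
def pvDeg (matrix : List (List Int)) (n : Int) : Int :=
  matrix.foldl (fun acc row => acc + (PySem.List.pyGet? row n).getD 0) 0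

-- A's branch-1 loop: state (min_degree, min_degree_node), None = float('inf') / None
def pvLoopA (matrix : List (List Int)) : List Int → Option Int → Option Int → Option Int
  | [], _, mb => mb
  | n :: ns, md, mb =>
    let d := pvDeg matrix n
    if (match md with | none => true | some m => decide (d < m)) = true then
      pvLoopA matrix ns (some d) (some n)
    else
      pvLoopA matrix ns md mb

-- A's branch-2 rescan: first index (from i) whose row sum equals m
def pvScanA (m : Int) : List (List Int) → Int → Option Int
  | [], _ => none
  | row :: rest, i => if row.sum = m then some i else pvScanA m rest (i + 1)

-- A's else branch: min(sum(row) for row in matrix) then the enumerate scan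
-- (none = ValueError of min() on an empty matrix, excluded by Pre_; the scan always hits)
def pvElseA (matrix : List (List Int)) : Option Int :=
  match PySem.List.min? (matrix.map List.sum) (fun y => y) with
  | none => none
  | some m => pvScanA m matrix 0

def find_check_node_with_lowest_degree (matrix : List (List Int)) (nodes : Option (List Int)) : Option Int :=
  match nodes with
  | some ns => if ns = [] then pvElseA matrix else pvLoopA matrix ns none none
  | none => pvElseA matrix

-- ===== PORT B =====
-- sorted(enumerate(matrix), key=lambda t: sum(t[1]))[0][0];
-- none = IndexError of [0] on an empty matrix (excluded by Pre_)
def pvSortB (matrix : List (List Int)) : Option Int :=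
  (PySem.List.pyGet? (PySem.List.sorted (PySem.List.enumerate matrix 0) (fun t => t.2.sum)) 0).map
    (fun t => t.1)

def find_check_node_with_lowest_degree_alt (matrix : List (List Int)) (nodes : Option (List Int)) : Option Int :=
  match nodes with
  | some ns =>
    if ns = [] then pvSortB matrix
    else PySem.List.pyGet? (PySem.List.sorted ns (fun n => pvDeg matrix n)) 0
  | none => pvSortB matrix

-- ===== PRECONDITION & SPEC =====
-- Pre_ excludes exactly the inputs where A raises: an empty matrix when nodes is falsy
-- (ValueError from min()), and any node index out of Python range for some row (IndexError).
def Pre_find_check_node_with_lowest_degree (matrix : List (List Int)) (nodes : Option (List Int)) : Prop :=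
  if nodes.getD [] = [] then matrix ≠ []
  else ∀ n ∈ nodes.getD [], ∀ row ∈ matrix, PySem.Raise.InRange row.length n
instance (matrix : List (List Int)) (nodes : Option (List Int)) : Decidable (Pre_find_check_node_with_lowest_degree matrix nodes) := by unfold Pre_find_check_node_with_lowest_degree; infer_instance

def pvWitness_find_check_node_with_lowest_degree : List (List Int) × Option (List Int) :=
  ([[1, 0], [0, 1]], some [0, 1])

def Spec_find_check_node_with_lowest_degree (matrix : List (List Int)) (nodes : Option (List Int)) (out : Option Int) : Prop := out = find_check_node_with_lowest_degree_alt matrix nodes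
instance (matrix : List (List Int)) (nodes : Option (List Int)) (out : Option Int) : Decidable (Spec_find_check_node_with_lowest_degree matrix nodes out) := by unfold Spec_find_check_node_with_lowest_degree; infer_instance

-- ===== CLAIM (what is proved, stated in full; the proofs are below) =====
def Claim_equal_find_check_node_with_lowest_degree : Prop := ∀ (matrix : List (List Int)) (nodes : Option (List Int)), Dom_find_check_node_with_lowest_degree matrix nodes → Pre_find_check_node_with_lowest_degree matrix nodes → Spec_find_check_node_with_lowest_degree matrix nodes (find_check_node_with_lowest_degree matrix nodes)

-- ===== LEMMAS AND PROOFS =====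

-- The strict-< running-minimum step shared by A's loop, min? and the head of the stable sort.
def pvStep {α κ : Type} [LinearOrder κ] (key : α → κ) (m x : α) : α :=
  if key x < key m then x else m

-- min? (b :: xs) key is the strict-< fold seeded with b.
lemma min?_cons_fold {α κ : Type} [LinearOrder κ] (key : α → κ) :
    ∀ (xs : List α) (b : α),
      PySem.List.min? (b :: xs) key = some (xs.foldl (pvStep key) b) := by
  have aux : ∀ (xs : List α) (b : α),
      List.foldl (fun acc x => match acc with
        | none => some x
        | some m => if key x < key m then some x else some m) (some b) xs
      = some (xs.foldl (pvStep key) b) := by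
    intro xs
    induction xs with
    | nil => intro b; rfl
    | cons x xs ih =>
      intro b
      by_cases h : key x < key b
      · simp [List.foldl, pvStep, h, ih]
      · simp [List.foldl, pvStep, h, ih]
  intro xs b
  simp only [PySem.List.min?, List.foldl]
  exact aux xs b

-- Inserting into a nonempty accumulator keeps it nonempty and updates the head by pvStep.
lemma foldl_insertBy_head {α κ : Type} [LinearOrder κ] (key : α → κ) :
    ∀ (xs : List α) (b : α) (t : List α),
      ∃ t', List.foldl (fun acc x => PySem.List.insertBy (fun a c => decide (key a < key c)) x acc)
              (b :: t) xs
            = (xs.foldl (pvStep key) b) :: t' := by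
  intro xs
  induction xs with
  | nil => intro b t; exact ⟨t, rfl⟩
  | cons x xs ih =>
    intro b t
    by_cases h : key x < key b
    · have e : PySem.List.insertBy (fun a c => decide (key a < key c)) x (b :: t)
          = x :: b :: t := by
        simp [PySem.List.insertBy, h]
      rcases ih x (b :: t) with ⟨t', ht'⟩
      exact ⟨t', by simp [List.foldl, e, pvStep, h, ht']⟩
    · have e : PySem.List.insertBy (fun a c => decide (key a < key c)) x (b :: t)
          = b :: PySem.List.insertBy (fun a c => decide (key a < key c)) x t := by
        simp [PySem.List.insertBy, h]
      rcases ih b (PySem.List.insertBy (fun a c => decide (key a < key c)) x t) with ⟨t', ht'⟩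
      exact ⟨t', by simp [List.foldl, e, pvStep, h, ht']⟩

-- Head of the stable sort (= sorted(xs,key)[0]) is min? xs key: the FIRST minimizer.
lemma sorted_cons_pyGet0 {α κ : Type} [LinearOrder κ] (key : α → κ) (b : α) (xs : List α) :
    PySem.List.pyGet? (PySem.List.sorted (b :: xs) key) 0 = PySem.List.min? (b :: xs) key := by
  rcases foldl_insertBy_head key xs b [] with ⟨t', ht'⟩
  have hs : PySem.List.sorted (b :: xs) key = (xs.foldl (pvStep key) b) :: t' := by
    rw [PySem.List.sorted_eq_foldl_insertBy]
    simpa [List.foldl, PySem.List.insertBy] using ht'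
  rw [hs, min?_cons_fold]
  simp [PySem.List.pyGet?, PySem.List.pyIdx?]

-- Branch 1: A's accumulator loop, seeded with a first node, is Python's min-with-key.
lemma loopA_min? (matrix : List (List Int)) :
    ∀ (ns : List Int) (b : Int),
      pvLoopA matrix ns (some (pvDeg matrix b)) (some b) =
      PySem.List.min? (b :: ns) (fun x => pvDeg matrix x) := by
  intro ns
  induction ns with
  | nil => intro b; simp [pvLoopA, PySem.List.min?, List.foldl]
  | cons n ns ih =>
    intro b
    by_cases h : pvDeg matrix n < pvDeg matrix b
    · simp [pvLoopA, PySem.List.min?, List.foldl, h, ih]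
    · simp [pvLoopA, PySem.List.min?, List.foldl, h, ih]

lemma branch1_eq (matrix : List (List Int)) (n : Int) (ns : List Int) :
    pvLoopA matrix (n :: ns) none none = PySem.List.min? (n :: ns) (fun x => pvDeg matrix x) :=
  loopA_min? matrix ns n

-- min? over enumerate(matrix), projected to the index: used only by the proofs.
def pvMinEnum (matrix : List (List Int)) : Option Int :=
  (PySem.List.min? (PySem.List.enumerate matrix 0) (fun t => t.2.sum)).map (fun t => t.1)

-- B's sorted-head else branch equals the min? formulation.
lemma sortB_eq_minEnum (r : List Int) (rs : List (List Int)) :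
    pvSortB (r :: rs) = pvMinEnum (r :: rs) := by
  rw [pvSortB, pvMinEnum, PySem.List.enumerate_cons, sorted_cons_pyGet0]

-- Branch 2 helper used only by the proofs: first strict minimizer of row sums, with start state.
def pvFam : Int → (Int × List Int) → List (List Int) → Int → (Int × List Int)
  | _, b, [], _ => b
  | kb, b, r :: rs, i =>
    if r.sum < kb then pvFam r.sum (i, r) rs (i + 1) else pvFam kb b rs (i + 1)

lemma min?_enum_eq_fam :
    ∀ (rs : List (List Int)) (i : Int) (b : Int × List Int),
      PySem.List.min? (b :: PySem.List.enumerate rs i) (fun t => t.2.sum)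
      = some (pvFam b.2.sum b rs i) := by
  intro rs
  induction rs with
  | nil => intro i b; simp [PySem.List.enumerate_nil, PySem.List.min?, List.foldl, pvFam]
  | cons r rs ih =>
    intro i b
    have h1 := ih (i + 1) (i, r)
    have h2 := ih (i + 1) b
    simp only [PySem.List.min?, List.foldl] at h1 h2
    by_cases h : r.sum < b.2.sum
    · simp [PySem.List.enumerate_cons, PySem.List.min?, List.foldl, h, pvFam, h1]
    · simp [PySem.List.enumerate_cons, PySem.List.min?, List.foldl, h, pvFam, h2]

lemma fml_le : ∀ (t : List Int) (kb : Int), t.foldl min kb ≤ kb := by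
  intro t
  induction t with
  | nil => intro kb; simp
  | cons x t ih =>
    intro kb
    calc (x :: t).foldl min kb = t.foldl min (min kb x) := rfl
      _ ≤ min kb x := ih _
      _ ≤ kb := min_le_left _ _

lemma fml_lb : ∀ (t : List Int) (kb x : Int), x ∈ t → t.foldl min kb ≤ x := by
  intro t
  induction t with
  | nil => intro kb x hx; simp at hx
  | cons y t ih =>
    intro kb x hx
    rcases List.mem_cons.mp hx with h | h
    · subst h
      calc (x :: t).foldl min kb = t.foldl min (min kb x) := rfl
        _ ≤ min kb x := fml_le _ _
        _ ≤ x := min_le_right _ _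
    · exact ih (min kb y) x h

lemma fml_ge : ∀ (t : List Int) (kb c : Int), c ≤ kb → (∀ x ∈ t, c ≤ x) → c ≤ t.foldl min kb := by
  intro t
  induction t with
  | nil => intro kb c h _; simpa using h
  | cons y t ih =>
    intro kb c h hall
    have hy : c ≤ y := hall y (by simp)
    exact ih (min kb y) c (le_min h hy) (fun x hx => hall x (by simp [hx]))

-- pvFam's pick is the first row (from index i) whose sum is the overall minimum.
lemma fam_eq_scan :
    ∀ (rs : List (List Int)) (kb : Int) (b : Int × List Int) (i : Int),
      some (pvFam kb b rs i).1 =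
        if rs.any (fun r => decide (r.sum < kb)) then
          pvScanA ((rs.map List.sum).foldl min kb) rs i
        else some b.1 := by
  intro rs
  induction rs with
  | nil => intro kb b i; simp [pvFam]
  | cons r rs ih =>
    intro kb b i
    by_cases h : r.sum < kb
    · have hmin : min kb r.sum = r.sum := min_eq_right (le_of_lt h)
      have lhs : pvFam kb b (r :: rs) i = pvFam r.sum (i, r) rs (i + 1) := by
        simp [pvFam, h]
      rw [lhs, ih]
      by_cases h2 : rs.any (fun x => decide (x.sum < r.sum))
      · rcases List.any_eq_true.mp h2 with ⟨x, hx, hlt⟩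
        have hlt' : x.sum < r.sum := of_decide_eq_true hlt
        have hM : (rs.map List.sum).foldl min r.sum < r.sum :=
          lt_of_le_of_lt (fml_lb _ _ _ (List.mem_map_of_mem hx)) hlt'
        have hne : ¬ (r.sum = (rs.map List.sum).foldl min r.sum) := by omega
        simp [h2, h, pvScanA, List.map, hmin, hne]
      · have hall : ∀ x ∈ rs, r.sum ≤ x.sum := by
          intro x hx
          by_contra hc
          exact h2 (List.any_eq_true.mpr ⟨x, hx, decide_eq_true (by omega)⟩)
        have hM : r.sum ≤ (rs.map List.sum).foldl min r.sum := by
          apply fml_ge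
          · exact le_refl _
          · intro x hx
            rcases List.mem_map.mp hx with ⟨y, hy, rfl⟩
            exact hall y hy
        have hMle : (rs.map List.sum).foldl min r.sum ≤ r.sum := fml_le _ _
        have hMeq : (rs.map List.sum).foldl min r.sum = r.sum := le_antisymm hMle hM
        simp [h2, h, pvScanA, List.map, hmin, hMeq]
    · have hmin : min kb r.sum = kb := min_eq_left (by omega)
      have lhs : pvFam kb b (r :: rs) i = pvFam kb b rs (i + 1) := by
        simp [pvFam, h]
      rw [lhs, ih]
      by_cases h2 : rs.any (fun x => decide (x.sum < kb))
      · rcases List.any_eq_true.mp h2 with ⟨x, hx, hlt⟩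
        have hlt' : x.sum < kb := of_decide_eq_true hlt
        have hM : (rs.map List.sum).foldl min kb < kb :=
          lt_of_le_of_lt (fml_lb _ _ _ (List.mem_map_of_mem hx)) hlt'
        have hne : ¬ (r.sum = (rs.map List.sum).foldl min kb) := by omega
        simp [h2, h, pvScanA, List.map, hmin, hne]
      · simp [h2, h]

lemma branch2_eq (r : List Int) (rs : List (List Int)) :
    pvElseA (r :: rs) = pvSortB (r :: rs) := by
  rw [sortB_eq_minEnum]
  have hB : pvMinEnum (r :: rs) = some (pvFam r.sum ((0 : Int), r) rs 1).1 := by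
    have e : (0 : Int) + 1 = 1 := rfl
    rw [pvMinEnum, PySem.List.enumerate_cons, e, min?_enum_eq_fam rs 1 ((0 : Int), r)]
    rfl
  have hA : pvElseA (r :: rs) = pvScanA ((rs.map List.sum).foldl min r.sum) (r :: rs) 0 := by
    simp [pvElseA, PySem.List.min?_id_cons, List.map]
  rw [hA, hB, fam_eq_scan rs r.sum ((0 : Int), r) 1]
  by_cases h2 : rs.any (fun x => decide (x.sum < r.sum))
  · rcases List.any_eq_true.mp h2 with ⟨x, hx, hlt⟩
    have hlt' : x.sum < r.sum := of_decide_eq_true hlt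
    have hM : (rs.map List.sum).foldl min r.sum < r.sum :=
      lt_of_le_of_lt (fml_lb _ _ _ (List.mem_map_of_mem hx)) hlt'
    have hne : ¬ (r.sum = (rs.map List.sum).foldl min r.sum) := by omega
    simp [h2, pvScanA, hne]
  · have hall : ∀ x ∈ rs, r.sum ≤ x.sum := by
      intro x hx
      by_contra hc
      exact h2 (List.any_eq_true.mpr ⟨x, hx, decide_eq_true (by omega)⟩)
    have hM : r.sum ≤ (rs.map List.sum).foldl min r.sum := by
      apply fml_ge
      · exact le_refl _
      · intro x hx
        rcases List.mem_map.mp hx with ⟨y, hy, rfl⟩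
        exact hall y hy
    have hMeq : (rs.map List.sum).foldl min r.sum = r.sum := le_antisymm (fml_le _ _) hM
    simp [h2, pvScanA, hMeq]

-- ===== VERDICT (by name: the statement is the Claim_ definition above) =====
theorem find_check_node_with_lowest_degree_spec : Claim_equal_find_check_node_with_lowest_degree := by
  intro matrix nodes _ hpre
  unfold Spec_find_check_node_with_lowest_degree
  match nodes with
  | none =>
    match matrix, hpre with
    | r :: rs, _ =>
      simpa [find_check_node_with_lowest_degree, find_check_node_with_lowest_degree_alt] using
        branch2_eq r rs
  | some [] =>
    match matrix, hpre with
    | r :: rs, _ =>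
      simpa [find_check_node_with_lowest_degree, find_check_node_with_lowest_degree_alt] using
        branch2_eq r rs
  | some (n :: ns) =>
    have hne : (n :: ns : List Int) ≠ [] := by simp
    simp only [find_check_node_with_lowest_degree, find_check_node_with_lowest_degree_alt,
      if_neg hne]
    rw [branch1_eq, ← sorted_cons_pyGet0]
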